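-- pv_equiv track=rewrite | github.com/fernandacodes/UFAM_atividades | 1_periodo/atvDominoPARTE II.py | e_palav
-- ===== SOURCE A (Python) =====
-- def number():
--     l = []
--     for i in range(46,58):
--         l = l + [chr(i)]
--     return l
--
-- def e_palav(palavra):
--     cont = 0
--     contF = 0
--     numero = number()
--     for i in range(len(palavra)):
--         for j in range(65,91):
--             for c in range(97,123):
--                 for k in range(len(numero)):
--                     if(palavra[i]==chr(j) or palavra[i]==chr(c)):
--                         cont +=1
--                     elif(palavra[i]==numero[k]):
--                         contF +=1
--     if(contF==0):
--         return True
--     else: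
--         return False
-- ===== SOURCE B (Python) =====
-- def e_palav(palavra):
--     return set(palavra).isdisjoint('0123456789./')
-- ===== Notes on version B (the rewrite author's own statement) =====
-- stated objective: faster
-- what changed: Replaces A's quadruple nested loop (per character x 26 uppercase x 26 lowercase x 12 forbidden chars, with counters) by building the set of the input's characters once and testing it for disjointness with the forbidden set '.', '/', '0'-'9'.
import Mathlib
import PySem

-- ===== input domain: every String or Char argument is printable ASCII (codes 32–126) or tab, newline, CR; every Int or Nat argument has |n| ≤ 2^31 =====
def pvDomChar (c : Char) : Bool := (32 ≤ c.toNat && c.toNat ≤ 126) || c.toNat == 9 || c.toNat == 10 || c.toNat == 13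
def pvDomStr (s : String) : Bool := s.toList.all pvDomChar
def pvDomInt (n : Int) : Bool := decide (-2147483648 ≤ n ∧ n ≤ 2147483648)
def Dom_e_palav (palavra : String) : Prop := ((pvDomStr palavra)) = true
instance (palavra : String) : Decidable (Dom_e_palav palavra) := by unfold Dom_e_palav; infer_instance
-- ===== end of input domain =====

-- B replaces A's quadruple nested counting loop by a set-disjointness test against the forbidden chars 46–57 (objective: faster by a large constant factor).

-- ===== PORT A =====
-- number(): builds [chr(i) for i in range(46,58)] by repeated list concatenation
def pvNumber : List Char :=
  (PySem.List.pyRange 46 58 1).foldl (fun l i => l ++ [Char.ofNat i.toNat]) []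

-- cont/contF are the two components of the fold state; numero is pvNumber (= number())
def e_palav (palavra : String) : Bool :=
  if ((PySem.List.pyRange 0 (palavra.toList.length : Int) 1).foldl (fun s i =>
      (PySem.List.pyRange 65 91 1).foldl (fun s j =>
        (PySem.List.pyRange 97 123 1).foldl (fun s c =>
          (PySem.List.pyRange 0 (pvNumber.length : Int) 1).foldl (fun s k =>
            if PySem.List.pyGetD palavra.toList i ' ' = Char.ofNat j.toNat ∨
               PySem.List.pyGetD palavra.toList i ' ' = Char.ofNat c.toNat then
              (s.1 + 1, s.2)
            else if PySem.List.pyGetD palavra.toList i ' ' = PySem.List.pyGetD pvNumber k ' ' then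
              (s.1, s.2 + 1)
            else s) s) s) s) ((0, 0) : Int × Int)).2 = 0 then true else false

-- ===== PORT B =====
def e_palav_alt (palavra : String) : Bool :=
  PySem.Set.isdisjoint (PySem.Set.ofList palavra.toList) "0123456789./".toList

-- ===== PRECONDITION & SPEC =====
def Spec_e_palav (palavra : String) (out : Bool) : Prop := out = e_palav_alt palavra
instance (palavra : String) (out : Bool) : Decidable (Spec_e_palav palavra out) := by unfold Spec_e_palav; infer_instance

-- ===== CLAIM (what is proved, stated in full; the proofs are below) =====
def Claim_equal_e_palav : Prop := ∀ (palavra : String), Dom_e_palav palavra → Spec_e_palav palavra (e_palav palavra)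

-- ===== LEMMAS AND PROOFS =====

theorem pvNumber_eq : pvNumber = ['.', '/', '0', '1', '2', '3', '4', '5', '6', '7', '8', '9'] := by
  decide

-- per-character contribution of A's triple inner loop to contF
def pvT (x : Char) : Int :=
  ((PySem.List.pyRange 65 91 1).map (fun j =>
    ((PySem.List.pyRange 97 123 1).map (fun c =>
      if x = Char.ofNat j.toNat ∨ x = Char.ofNat c.toNat then 0
      else (pvNumber.count x : Int))).sum)).sum

theorem sum_ite_count (x : Char) (L : List Char) :
    (L.map (fun y => if x = y then (1:Int) else 0)).sum = (L.count x : Int) := by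
  induction L with
  | nil => simp
  | cons a t ih =>
      simp only [List.map_cons, List.sum_cons, List.count_cons]
      by_cases h : x = a
      · subst h; simp [ih]; ring
      · simp [h, Ne.symm h, ih]

theorem foldl_snd {α : Type} (g : Int × Int → α → Int × Int) (h : α → Int)
    (hg : ∀ s a, (g s a).2 = s.2 + h a) :
    ∀ (L : List α) (s : Int × Int), (L.foldl g s).2 = s.2 + (L.map h).sum := by
  intro L
  induction L with
  | nil => intro s; simp
  | cons a t ih =>
      intro s
      simp only [List.foldl_cons, List.map_cons, List.sum_cons]
      rw [ih, hg]; ring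

theorem kloop_snd (x : Char) (j c : Int) (s : Int × Int) :
    (pvNumber.foldl (fun s y =>
      if x = Char.ofNat j.toNat ∨ x = Char.ofNat c.toNat then (s.1 + 1, s.2)
      else if x = y then (s.1, s.2 + 1) else s) s).2
    = s.2 + (if x = Char.ofNat j.toNat ∨ x = Char.ofNat c.toNat then 0
             else (pvNumber.count x : Int)) := by
  by_cases hP : x = Char.ofNat j.toNat ∨ x = Char.ofNat c.toNat
  · rw [foldl_snd _ (fun _ => (0:Int)) (by intro s a; simp [hP])]
    simp [hP]
  · rw [foldl_snd _ (fun y => if x = y then (1:Int) else 0)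
        (by intro s a
            by_cases h : x = a
            · subst h; simp [hP]
            · simp [hP, h])]
    rw [sum_ite_count]
    simp [hP]

theorem contF_eq (palavra : String) :
    ((PySem.List.pyRange 0 (palavra.toList.length : Int) 1).foldl (fun s i =>
      (PySem.List.pyRange 65 91 1).foldl (fun s j =>
        (PySem.List.pyRange 97 123 1).foldl (fun s c =>
          (PySem.List.pyRange 0 ((pvNumber.length : Nat) : Int) 1).foldl (fun s k =>
            if PySem.List.pyGetD palavra.toList i ' ' = Char.ofNat j.toNat ∨
               PySem.List.pyGetD palavra.toList i ' ' = Char.ofNat c.toNat then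
              (s.1 + 1, s.2)
            else if PySem.List.pyGetD palavra.toList i ' ' = PySem.List.pyGetD pvNumber k ' ' then
              (s.1, s.2 + 1)
            else s) s) s) s) ((0, 0) : Int × Int)).2
    = (palavra.toList.map pvT).sum := by
  rw [PySem.List.foldl_pyRange_zero_pyGetD' palavra.toList ' '
      (fun s x =>
        (PySem.List.pyRange 65 91 1).foldl (fun s j =>
          (PySem.List.pyRange 97 123 1).foldl (fun s c =>
            (PySem.List.pyRange 0 ((pvNumber.length : Nat) : Int) 1).foldl (fun s k =>
              if x = Char.ofNat j.toNat ∨ x = Char.ofNat c.toNat then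
                (s.1 + 1, s.2)
              else if x = PySem.List.pyGetD pvNumber k ' ' then
                (s.1, s.2 + 1)
              else s) s) s) s) ((0,0) : Int × Int)]
  rw [foldl_snd _ pvT]
  · simp
  · intro s x
    rw [foldl_snd _ (fun j =>
        ((PySem.List.pyRange 97 123 1).map (fun c =>
          if x = Char.ofNat j.toNat ∨ x = Char.ofNat c.toNat then 0
          else (pvNumber.count x : Int))).sum)]
    · rfl
    · intro s j
      rw [foldl_snd _ (fun c =>
          if x = Char.ofNat j.toNat ∨ x = Char.ofNat c.toNat then 0
          else (pvNumber.count x : Int))]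
      intro s c
      rw [PySem.List.foldl_pyRange_zero_pyGetD' pvNumber ' '
          (fun s y =>
            if x = Char.ofNat j.toNat ∨ x = Char.ofNat c.toNat then (s.1 + 1, s.2)
            else if x = y then (s.1, s.2 + 1) else s) s]
      exact kloop_snd x j c s

theorem pvT_of_not_mem (x : Char) (hx : x ∉ pvNumber) : pvT x = 0 := by
  unfold pvT
  rw [List.count_eq_zero_of_not_mem hx]
  simp

theorem pvT_pos_of_mem (x : Char) (hx : x ∈ pvNumber) : 0 < pvT x := by
  have hxlt : x.toNat < 58 := by
    rw [pvNumber_eq] at hx; fin_cases hx <;> decide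
  have hne : ∀ j ∈ PySem.List.pyRange 65 91 1, ∀ c ∈ PySem.List.pyRange 97 123 1,
      ¬(x = Char.ofNat j.toNat ∨ x = Char.ofNat c.toNat) := by
    intro j hj c hc
    rw [PySem.List.mem_pyRange_one] at hj hc
    rintro (h | h)
    · have : x.toNat = (Char.ofNat j.toNat).toNat := by rw [h]
      rw [Char.toNat_ofNat] at this
      have hv : j.toNat.isValidChar := by
        unfold Nat.isValidChar; left; omega
      rw [if_pos hv] at this
      omega
    · have : x.toNat = (Char.ofNat c.toNat).toNat := by rw [h]
      rw [Char.toNat_ofNat] at this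
      have hv : c.toNat.isValidChar := by
        unfold Nat.isValidChar; left; omega
      rw [if_pos hv] at this
      omega
  have hcnt : 0 < (pvNumber.count x : Int) := by
    exact_mod_cast List.count_pos_iff.mpr hx
  unfold pvT
  have hmapeq : ∀ j ∈ PySem.List.pyRange 65 91 1,
      ((PySem.List.pyRange 97 123 1).map (fun c =>
        if x = Char.ofNat j.toNat ∨ x = Char.ofNat c.toNat then 0
        else (pvNumber.count x : Int))).sum
      = ((PySem.List.pyRange 97 123 1).length : Int) * (pvNumber.count x : Int) := by
    intro j hj
    rw [List.map_congr_left (fun c hc => if_neg (hne j hj c hc)),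
        PySem.List.sum_map_const_int]
  rw [List.map_congr_left hmapeq, PySem.List.sum_map_const_int]
  have h1 : ((PySem.List.pyRange 97 123 1).length : Int) = 26 := by decide
  have h2 : ((PySem.List.pyRange 65 91 1).length : Int) = 26 := by decide
  rw [h1, h2]
  nlinarith

theorem pvT_nonneg (x : Char) : 0 ≤ pvT x := by
  by_cases hx : x ∈ pvNumber
  · exact le_of_lt (pvT_pos_of_mem x hx)
  · rw [pvT_of_not_mem x hx]

theorem sum_pvT_eq_zero_iff (L : List Char) :
    (L.map pvT).sum = 0 ↔ ∀ x ∈ L, x ∉ pvNumber := by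
  induction L with
  | nil => simp
  | cons a t ih =>
      simp only [List.map_cons, List.sum_cons, List.mem_cons]
      constructor
      · intro h
        have h1 : (t.map pvT).sum = 0 ∧ pvT a = 0 := by
          have ht : 0 ≤ (t.map pvT).sum := by
            apply List.sum_nonneg; intro y hy
            obtain ⟨z, _, rfl⟩ := List.mem_map.mp hy
            exact pvT_nonneg z
          have ha := pvT_nonneg a
          constructor <;> omega
        intro x hx
        rcases hx with rfl | hx
        · intro hmem
          exact absurd h1.2 (ne_of_gt (pvT_pos_of_mem x hmem))
        · exact (ih.mp h1.1) x hx
      · intro h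
        rw [pvT_of_not_mem a (h a (Or.inl rfl)), ih.mpr (fun x hx => h x (Or.inr hx))]
        norm_num

theorem mem_forb (x : Char) : x ∈ "0123456789./".toList ↔ x ∈ pvNumber := by
  have h : "0123456789./".toList = ['0','1','2','3','4','5','6','7','8','9','.','/'] := by decide
  rw [h, pvNumber_eq]
  simp only [List.mem_cons, List.not_mem_nil, or_false]
  tauto

theorem e_palav_alt_iff (palavra : String) :
    e_palav_alt palavra = true ↔ ∀ x ∈ palavra.toList, x ∉ pvNumber := by
  unfold e_palav_alt PySem.Set.isdisjoint PySem.Set.contains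
  simp only [Bool.not_eq_eq_eq_not, Bool.not_true, List.any_eq_false,
             List.contains_eq_mem]
  constructor
  · intro h x hx
    have := h x ((PySem.Set.mem_ofList palavra.toList x).mpr hx)
    exact fun hm => this (by simpa using (mem_forb x).mpr hm)
  · intro h x hx hm
    exact h x ((PySem.Set.mem_ofList palavra.toList x).mp hx) ((mem_forb x).mp (by simpa using hm))

-- ===== VERDICT (by name: the statement is the Claim_ definition above) =====
theorem e_palav_spec : Claim_equal_e_palav := by
  intro palavra _
  unfold Spec_e_palav e_palav
  rw [Bool.eq_iff_iff, e_palav_alt_iff]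
  constructor
  · intro h
    split_ifs at h with hz
    · rw [← sum_pvT_eq_zero_iff, ← contF_eq palavra]
      exact hz
  · intro h
    have hz := (sum_pvT_eq_zero_iff palavra.toList).mpr h
    rw [← contF_eq palavra] at hz
    rw [if_pos hz]
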